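-- pv_equiv track=rewrite | github.com/nats-io/nats.py | nats/tests/test_custom_headers_websocket.py | has_header_value
-- ===== SOURCE A (Python) =====
-- def has_header_value(headers, name, want):
--     prefix = name.lower() + ":"
--     for h in headers:
--         if ":" not in h:
--             continue
--         if not h.lower().startswith(prefix):
--             continue
--         val = h.split(":", 1)[1].strip()
--         for part in val.split(","):
--             if part.strip().lower() == want.lower():
--                 return True
--     return False
-- ===== SOURCE B (Python) =====
-- def has_header_value(headers, name, want):
--     # Two-phase: build an index  header-name -> set of lowered value parts,  then one membership test.
--     table = {}
--     for h in headers: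
--         if ":" in h:
--             key, rest = h.split(":", 1)
--             table.setdefault(key.lower(), set()).update(
--                 p.strip().lower() for p in rest.strip().split(","))
--     return want.lower() in table.get(name.lower(), set())
-- ===== Notes on version B (the rewrite author's own statement) =====
-- stated objective: alternative
-- what changed: Replaces A's single inline scan (per header: prefix test, then an inner comma-part comparison loop with early return) by a two-phase computation: one pass builds a dict from lowered header name to the set of its lowered comma-separated value parts (accumulating across duplicate header names), and the answer is a single membership query on that index.
-- outside the precondition, e.g. on has_header_value(['a:b:c'], 'a:b', 'b:c'): A returns True, B returns False
import Mathlib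
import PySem

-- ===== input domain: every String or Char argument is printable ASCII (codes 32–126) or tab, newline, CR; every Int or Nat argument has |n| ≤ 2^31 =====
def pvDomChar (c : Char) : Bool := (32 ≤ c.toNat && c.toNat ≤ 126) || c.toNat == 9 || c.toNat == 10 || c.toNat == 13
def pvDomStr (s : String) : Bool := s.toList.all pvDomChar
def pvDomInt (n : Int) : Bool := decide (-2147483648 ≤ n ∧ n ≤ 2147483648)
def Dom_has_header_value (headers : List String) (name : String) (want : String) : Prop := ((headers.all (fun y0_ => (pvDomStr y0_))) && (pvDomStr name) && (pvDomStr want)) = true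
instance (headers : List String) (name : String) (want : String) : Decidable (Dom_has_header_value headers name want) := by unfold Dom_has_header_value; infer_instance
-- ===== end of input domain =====

-- B replaces A's inline scan-and-compare with a two-phase computation: build a dict from lowered
-- header name to the set of its lowered comma-separated value parts, then do one membership query.

-- ===== PORT A =====
-- literal transliteration of A: early-return loops become List.any; string ops via PySem.Chars on .toList
def has_header_value (headers : List String) (name : String) (want : String) : Bool :=
  headers.any (fun h =>
    if !(PySem.Chars.isIn [':'] h.toList) then false
    else if !(PySem.Chars.startswith (PySem.Chars.lower h.toList)
        (PySem.Chars.lower name.toList ++ [':'])) then false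
    else
      -- val = h.split(":", 1)[1].strip()  (index 1 exists: ':' ∈ h in this branch)
      (PySem.Chars.splitOn
          (PySem.Chars.strip (PySem.List.pyGetD (PySem.Chars.splitOnMax h.toList [':'] 1) 1 []))
          [',']).any (fun part =>
        PySem.Chars.lower (PySem.Chars.strip part) == PySem.Chars.lower want.toList))

-- ===== PORT B =====
-- literal transliteration of Source B: one fold building the index dict, then a single lookup
def has_header_value_alt (headers : List String) (name : String) (want : String) : Bool :=
  PySem.Set.contains
    ((headers.foldl (fun d h =>
      let hl := h.toList
      if PySem.Chars.isIn [':'] hl then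
        let pieces := PySem.Chars.splitOnMax hl [':'] 1
        let key := PySem.Chars.lower (pieces.getD 0 [])
        let rest := pieces.getD 1 []
        -- table.setdefault(key, set()).update(p.strip().lower() for p in rest.strip().split(","))
        d.modify key PySem.Set.empty (fun s =>
          PySem.Set.update s ((PySem.Chars.splitOn (PySem.Chars.strip rest) [',']).map
            (fun p => PySem.Chars.lower (PySem.Chars.strip p))))
      else d) PySem.Dict.empty).getD (PySem.Chars.lower name.toList) PySem.Set.empty)
    (PySem.Chars.lower want.toList)

-- ===== PRECONDITION & SPEC =====
-- Pre_ excludes names containing ':' — a degenerate header name on which A's prefix test can match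
-- across the first colon of a header while B keys headers on the text before their first colon,
-- so the two defensible readings diverge (A returns a value there; real header names have no colon).
def Pre_has_header_value (headers : List String) (name : String) (want : String) : Prop :=
  ':' ∉ name.toList
instance (headers : List String) (name : String) (want : String) : Decidable (Pre_has_header_value headers name want) := by unfold Pre_has_header_value; infer_instance

def pvWitness_has_header_value : List String × String × String := (["A: b,c"], "a", "C")

def Spec_has_header_value (headers : List String) (name : String) (want : String) (out : Bool) : Prop := out = has_header_value_alt headers name want
instance (headers : List String) (name : String) (want : String) (out : Bool) : Decidable (Spec_has_header_value headers name want out) := by unfold Spec_has_header_value; infer_instance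

-- ===== CLAIM (what is proved, stated in full; the proofs are below) =====
def Claim_equal_has_header_value : Prop := ∀ (headers : List String) (name : String) (want : String), Dom_has_header_value headers name want → Pre_has_header_value headers name want → Spec_has_header_value headers name want (has_header_value headers name want)

-- ===== LEMMAS AND PROOFS =====


theorem pv_go_zero' (fuel : Nat) (l cur : List Char) (accs : List (List Char)) :
    PySem.Chars.splitOnMax.go [':'] fuel 0 l cur accs = ((cur.reverse ++ l) :: accs).reverse := by
  cases fuel with
  | zero => simp [PySem.Chars.splitOnMax.go]
  | succ f => cases l with
    | nil => simp [PySem.Chars.splitOnMax.go]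
    | cons c rest => simp [PySem.Chars.splitOnMax.go]

theorem pv_go_one : ∀ (fuel : Nat) (l cur : List Char) (accs : List (List Char)), l.length < fuel →
    PySem.Chars.splitOnMax.go [':'] fuel 1 l cur accs =
      if ':' ∈ l then
        (((l.dropWhile (· ≠ ':')).tail) :: (cur.reverse ++ l.takeWhile (· ≠ ':')) :: accs).reverse
      else ((cur.reverse ++ l) :: accs).reverse := by
  intro fuel
  induction fuel with
  | zero => intro l cur accs h; omega
  | succ f ih =>
    intro l cur accs h
    cases l with
    | nil => simp [PySem.Chars.splitOnMax.go]
    | cons c rest =>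
      by_cases hc : c = ':'
      · subst hc
        simp [PySem.Chars.splitOnMax.go, List.isPrefixOf, pv_go_zero']
      · have h' : rest.length < f := by simpa using h
        simp [PySem.Chars.splitOnMax.go, List.isPrefixOf, Ne.symm hc, hc, ih rest (c :: cur) accs h']

theorem pv_splitOnMax_colon (l : List Char) (h : ':' ∈ l) :
    PySem.Chars.splitOnMax l [':'] 1 = [l.takeWhile (· ≠ ':'), (l.dropWhile (· ≠ ':')).tail] := by
  unfold PySem.Chars.splitOnMax
  rw [if_neg (by omega)]
  rw [show Int.toNat 1 = 1 from rfl, pv_go_one (l.length + 1) l [] [] (by omega)]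
  simp [h]


theorem pv_isIn_single (c : Char) (l : List Char) : PySem.Chars.isIn [c] l = true ↔ c ∈ l := by
  rw [PySem.Chars.isIn_iff_infix]
  constructor
  · rintro ⟨s, t, rfl⟩; simp
  · intro h
    obtain ⟨s, t, rfl⟩ := List.append_of_mem h
    exact ⟨s, t, by simp⟩

theorem pv_lowerChar_colon (c : Char) : PySem.Chars.lowerChar c = ':' ↔ c = ':' := by
  unfold PySem.Chars.lowerChar PySem.Chars.isupper
  split_ifs with h
  · simp only [Bool.and_eq_true, decide_eq_true_eq] at h
    constructor
    · intro he
      exfalso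
      have h1 : ('A' : Char).toNat ≤ c.toNat := h.1
      have h2 : c.toNat ≤ ('Z' : Char).toNat := h.2
      have h1' : (65 : Nat) ≤ c.toNat := h1
      have h2' : c.toNat ≤ (90 : Nat) := h2
      have ht : (Char.ofNat (c.toNat + 32)).toNat = (':' : Char).toNat := by rw [he]
      rw [Char.toNat_ofNat, if_pos (by constructor; omega)] at ht
      have : (':' : Char).toNat = 58 := by decide
      omega
    · intro he; subst he; exact absurd h (by decide)
  · exact Iff.rfl

theorem pv_colon_mem_lower (u : List Char) : ':' ∈ PySem.Chars.lower u ↔ ':' ∈ u := by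
  unfold PySem.Chars.lower
  simp only [List.mem_map]
  constructor
  · rintro ⟨c, hc, he⟩; rwa [(pv_lowerChar_colon c).mp he] at hc
  · intro h; exact ⟨':', h, by decide⟩

theorem pv_decomp (l : List Char) (h : ':' ∈ l) :
    l = l.takeWhile (· ≠ ':') ++ ':' :: (l.dropWhile (· ≠ ':')).tail := by
  induction l with
  | nil => cases h
  | cons c rest ih =>
    by_cases hc : c = ':'
    · subst hc; simp
    · have hm : ':' ∈ rest := by rcases List.mem_cons.mp h with h1 | h1; exact absurd h1.symm hc; exact h1
      have hpc : (decide (c ≠ ':')) = true := by simp [hc]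
      rw [show List.takeWhile (fun x => decide (x ≠ ':')) (c :: rest) = c :: List.takeWhile (fun x => decide (x ≠ ':')) rest from by rw [List.takeWhile_cons, if_pos hpc],
         show List.dropWhile (fun x => decide (x ≠ ':')) (c :: rest) = List.dropWhile (fun x => decide (x ≠ ':')) rest from by rw [List.dropWhile_cons, if_pos hpc]]
      rw [List.cons_append]
      congr 1
      exact ih hm

theorem pv_prefix_colon : ∀ (u v w : List Char), ':' ∉ u → ':' ∉ v →
    ((v ++ [':']) <+: (u ++ ':' :: w) ↔ v = u) := by
  intro u
  induction u with
  | nil =>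
    intro v w hu hv
    cases v with
    | nil => simp
    | cons b v' =>
      simp only [List.cons_append, List.nil_append, List.cons_prefix_cons]
      constructor
      · rintro ⟨rfl, -⟩; exact absurd (List.mem_cons_self) hv
      · intro h; cases h
  | cons a u' ih =>
    intro v w hu hv
    cases v with
    | nil =>
      simp only [List.nil_append, List.cons_append, List.cons_prefix_cons]
      constructor
      · rintro ⟨rfl, -⟩; exact absurd List.mem_cons_self hu
      · intro h; cases h
    | cons b v' =>
      simp only [List.cons_append, List.cons_prefix_cons]
      rw [ih v' w (fun h => hu (List.mem_cons_of_mem _ h)) (fun h => hv (List.mem_cons_of_mem _ h))]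
      constructor
      · rintro ⟨rfl, rfl⟩; rfl
      · intro h; cases h; exact ⟨rfl, rfl⟩

-- the lowered value parts of one header line (proof-side abbreviation)
def pvParts (hl : List Char) : List (List Char) :=
  (PySem.Chars.splitOn (PySem.Chars.strip ((hl.dropWhile (· ≠ ':')).tail)) [',']).map
    (fun p => PySem.Chars.lower (PySem.Chars.strip p))

-- per-header: A's prefix test = B's key equality (for a colon-free name)
theorem pv_match_iff (hl nl : List Char) (hc : ':' ∈ hl) (hn : ':' ∉ nl) :
    PySem.Chars.startswith (PySem.Chars.lower hl) (nl ++ [':']) = true ↔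
      PySem.Chars.lower (hl.takeWhile (· ≠ ':')) = nl := by
  have hdec := pv_decomp hl hc
  have htw : ':' ∉ hl.takeWhile (· ≠ ':') := by
    intro hmem
    have := List.mem_takeWhile_imp hmem
    simp at this
  have hlow : PySem.Chars.lower hl =
      PySem.Chars.lower (hl.takeWhile (· ≠ ':')) ++ ':' ::
        PySem.Chars.lower ((hl.dropWhile (· ≠ ':')).tail) := by
    conv_lhs => rw [hdec]
    unfold PySem.Chars.lower
    simp [PySem.Chars.lowerChar]
    decide
  rw [PySem.Chars.startswith, List.isPrefixOf_iff_prefix, hlow,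
    pv_prefix_colon _ _ _ ((not_iff_not.mpr (pv_colon_mem_lower _)).mpr htw) hn]
  exact eq_comm

-- invariant of B's dict-building fold
theorem pv_fold_mem (hs : List String)
    (d : PySem.Dict (List Char) (PySem.Set (List Char))) (k x : List Char) :
    x ∈ (hs.foldl (fun d h =>
      let hl := h.toList
      if PySem.Chars.isIn [':'] hl then
        let pieces := PySem.Chars.splitOnMax hl [':'] 1
        let key := PySem.Chars.lower (pieces.getD 0 [])
        let rest := pieces.getD 1 []
        d.modify key PySem.Set.empty (fun s =>
          PySem.Set.update s ((PySem.Chars.splitOn (PySem.Chars.strip rest) [',']).map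
            (fun p => PySem.Chars.lower (PySem.Chars.strip p))))
      else d) d).getD k PySem.Set.empty ↔
    x ∈ d.getD k PySem.Set.empty ∨ ∃ h ∈ hs, ':' ∈ h.toList ∧
      PySem.Chars.lower (h.toList.takeWhile (· ≠ ':')) = k ∧ x ∈ pvParts h.toList := by
  induction hs generalizing d with
  | nil => simp
  | cons h t ih =>
    rw [List.foldl_cons, ih]
    by_cases hin : ':' ∈ h.toList
    · have hin' : PySem.Chars.isIn [':'] h.toList = true := (pv_isIn_single _ _).mpr hin
      simp only [hin', if_true, pv_splitOnMax_colon h.toList hin,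
        List.getD_cons_zero, List.getD_cons_succ]
      rw [PySem.Dict.getD_modify]
      by_cases hk : k = PySem.Chars.lower (List.takeWhile (fun x => decide (x ≠ ':')) h.toList)
      · subst hk
        rw [if_pos rfl, PySem.Set.mem_update]
        constructor
        · rintro ((h1 | h2) | h3)
          · exact Or.inl h1
          · exact Or.inr ⟨h, List.mem_cons_self, hin, rfl, by simpa [pvParts] using h2⟩
          · exact Or.inr (h3.imp (fun a ha => ⟨List.mem_cons_of_mem _ ha.1, ha.2⟩))
        · rintro (h1 | ⟨g, hg, hgc, hgk, hgx⟩)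
          · exact Or.inl (Or.inl h1)
          · rcases List.mem_cons.mp hg with rfl | hgt
            · exact Or.inl (Or.inr (by simpa [pvParts] using hgx))
            · exact Or.inr ⟨g, hgt, hgc, hgk, hgx⟩
      · rw [if_neg hk]
        constructor
        · rintro (h1 | h3)
          · exact Or.inl h1
          · exact Or.inr (h3.imp (fun a ha => ⟨List.mem_cons_of_mem _ ha.1, ha.2⟩))
        · rintro (h1 | ⟨g, hg, hgc, hgk, hgx⟩)
          · exact Or.inl h1
          · rcases List.mem_cons.mp hg with rfl | hgt
            · exact absurd hgk.symm hk
            · exact Or.inr ⟨g, hgt, hgc, hgk, hgx⟩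
    · have hin' : PySem.Chars.isIn [':'] h.toList = false := by
        rw [← Bool.not_eq_true]; exact fun hh => hin ((pv_isIn_single _ _).mp hh)
      simp only [hin', Bool.false_eq_true, if_false]
      constructor
      · rintro (h1 | h3)
        · exact Or.inl h1
        · exact Or.inr (h3.imp (fun a ha => ⟨List.mem_cons_of_mem _ ha.1, ha.2⟩))
      · rintro (h1 | ⟨g, hg, hgc, hgk, hgx⟩)
        · exact Or.inl h1
        · rcases List.mem_cons.mp hg with rfl | hgt
          · exact absurd hgc hin
          · exact Or.inr ⟨g, hgt, hgc, hgk, hgx⟩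


-- ===== VERDICT (by name: the statement is the Claim_ definition above) =====
theorem pv_pyGetD_two (a b d : List Char) : PySem.List.pyGetD [a, b] 1 d = b := rfl

theorem has_header_value_spec : Claim_equal_has_header_value := by
  intro headers name want _hD hP
  unfold Spec_has_header_value has_header_value has_header_value_alt
  rw [Bool.eq_iff_iff]
  have hn : ':' ∉ PySem.Chars.lower name.toList := fun hh => hP ((pv_colon_mem_lower _).mp hh)
  rw [List.any_eq_true, PySem.Set.contains_iff, pv_fold_mem]
  rw [PySem.Dict.getD_empty]
  constructor
  · rintro ⟨h, hh, hp⟩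
    by_cases hin : ':' ∈ h.toList
    · have hin' : PySem.Chars.isIn [':'] h.toList = true := (pv_isIn_single _ _).mpr hin
      rw [hin'] at hp
      simp only [Bool.not_true, Bool.false_eq_true, if_false] at hp
      by_cases hsw : PySem.Chars.startswith (PySem.Chars.lower h.toList)
          (PySem.Chars.lower name.toList ++ [':']) = true
      · rw [hsw] at hp
        simp only [Bool.not_true, Bool.false_eq_true, if_false] at hp
        rw [pv_splitOnMax_colon h.toList hin, pv_pyGetD_two, List.any_eq_true] at hp
        obtain ⟨part, hpm, hpe⟩ := hp
        refine Or.inr ⟨h, hh, hin, (pv_match_iff _ _ hin hn).mp hsw, ?_⟩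
        exact List.mem_map.mpr ⟨part, hpm, by simpa using hpe⟩
      · rw [Bool.not_eq_true] at hsw
        rw [hsw] at hp
        simp at hp
    · have hin' : PySem.Chars.isIn [':'] h.toList = false := by
        rw [← Bool.not_eq_true]; exact fun hh2 => hin ((pv_isIn_single _ _).mp hh2)
      rw [hin'] at hp
      simp at hp
  · rintro (h0 | ⟨h, hh, hc, hkey, hx⟩)
    · simp [PySem.Set.empty] at h0
    · refine ⟨h, hh, ?_⟩
      have hin' : PySem.Chars.isIn [':'] h.toList = true := (pv_isIn_single _ _).mpr hc
      have hsw : PySem.Chars.startswith (PySem.Chars.lower h.toList)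
          (PySem.Chars.lower name.toList ++ [':']) = true := (pv_match_iff _ _ hc hn).mpr hkey
      rw [hin', hsw]
      simp only [Bool.not_true, Bool.false_eq_true, if_false]
      rw [pv_splitOnMax_colon h.toList hc, pv_pyGetD_two, List.any_eq_true]
      obtain ⟨part, hpm, hpe⟩ := List.mem_map.mp hx
      exact ⟨part, hpm, by simpa using hpe⟩
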